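-- pv_equiv track=rewrite | github.com/MiloCoombs/milocoombs.github.io | p/Lorenz/Lorenz.py | fromBaudot
-- ===== SOURCE A (Python) =====
-- baudot = ["?","T","<","O"," ","H","N","M",">","L","R","G","I","P","C","V","E","Z","D","B","S","Y","F","X","A","W","J","^","U","Q","K","!"]
--
-- def fromBaudot(letter):
--     boolList = [False]*5
--     bits = list(bin(baudot.index(letter)))[2:] #take a list of chars
--     bits = ["0"]*(5-len(bits)) + bits #make it 5bits
--     for b in range(0,5):
--         if bits[b] == "0":
--             boolList[b] = False
--         else:
--             boolList[b] =True
--     return boolList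
-- ===== SOURCE B (Python) =====
-- baudot = ["?","T","<","O"," ","H","N","M",">","L","R","G","I","P","C","V","E","Z","D","B","S","Y","F","X","A","W","J","^","U","Q","K","!"]
--
-- def fromBaudot(letter):
--     idx = baudot.index(letter)
--     return [bool((idx >> (4 - i)) & 1) for i in range(5)]
-- ===== Notes on version B (the rewrite author's own statement) =====
-- stated objective: idiomatic
-- what changed: Replaces the bin()-string/slice/zero-pad/char-compare pipeline writing into a preallocated list with direct arithmetic bit extraction: a comprehension reading each of the 5 bits by shift-and-mask.
import Mathlib
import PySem

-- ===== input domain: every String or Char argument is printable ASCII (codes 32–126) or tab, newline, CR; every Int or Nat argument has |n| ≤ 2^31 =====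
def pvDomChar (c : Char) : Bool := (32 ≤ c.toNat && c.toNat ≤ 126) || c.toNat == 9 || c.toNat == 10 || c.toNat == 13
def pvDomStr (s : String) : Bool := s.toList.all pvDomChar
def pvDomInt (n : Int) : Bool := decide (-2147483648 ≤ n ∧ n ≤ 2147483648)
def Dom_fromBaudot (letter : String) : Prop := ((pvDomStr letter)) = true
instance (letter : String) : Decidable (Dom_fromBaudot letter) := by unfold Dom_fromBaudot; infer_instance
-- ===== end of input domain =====

-- B replaces A's bin()-string/slice/pad/char-compare pipeline by direct shift-and-mask bit extraction (idiomatic; same cost).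

-- shared module-level constant `baudot`
def baudotList : List String := ["?","T","<","O"," ","H","N","M",">","L","R","G","I","P","C","V","E","Z","D","B","S","Y","F","X","A","W","J","^","U","Q","K","!"]

-- ===== PORT A =====
def fromBaudot (letter : String) : List Bool :=
  match PySem.List.index? baudotList letter with
  | none => []  -- baudot.index raises ValueError: excluded by Pre_
  | some idx =>
    let boolList : List Bool := [false, false, false, false, false]
    let bits := PySem.List.slice (PySem.Int.toBinChars0b (idx : Int)) (some 2) none  -- list(bin(idx))[2:]
    let bits := List.replicate (5 - bits.length) '0' ++ bits                         -- ["0"]*(5-len(bits)) + bits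
    (PySem.List.pyRange 0 5 1).foldl (fun bl b =>
      if PySem.List.pyGetD bits b '?' == '0' then PySem.List.pySetD bl b false
      else PySem.List.pySetD bl b true) boolList

-- ===== PORT B =====
def fromBaudot_alt (letter : String) : List Bool :=
  match PySem.List.index? baudotList letter with
  | none => []  -- .index raises ValueError: excluded by Pre_
  | some idx => (List.range 5).map (fun i => ((idx >>> (4 - i)) &&& 1) == 1)

-- ===== PRECONDITION & SPEC =====
-- Pre_ excludes exactly the inputs on which A raises ValueError (letter not in the table).
def Pre_fromBaudot (letter : String) : Prop := letter ∈ baudotList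
instance (letter : String) : Decidable (Pre_fromBaudot letter) := by unfold Pre_fromBaudot; infer_instance
def pvWitness_fromBaudot : String := "T"
def Spec_fromBaudot (letter : String) (out : List Bool) : Prop := out = fromBaudot_alt letter
instance (letter : String) (out : List Bool) : Decidable (Spec_fromBaudot letter out) := by unfold Spec_fromBaudot; infer_instance

-- ===== CLAIM (what is proved, stated in full; the proofs are below) =====
def Claim_equal_fromBaudot : Prop := ∀ (letter : String), Dom_fromBaudot letter → Pre_fromBaudot letter → Spec_fromBaudot letter (fromBaudot letter)

-- ===== LEMMAS AND PROOFS =====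

-- ===== VERDICT (by name: the statement is the Claim_ definition above) =====
theorem fromBaudot_spec : Claim_equal_fromBaudot := by
  intro letter _ hpre
  unfold Pre_fromBaudot baudotList at hpre
  fin_cases hpre <;> decide
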